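-- pv_equiv track=rewrite | github.com/dengxiaya2004-ai/Modeling-of-Energy-System- | electric heater& grid.py | build_is_weekend
-- ===== SOURCE A (Python) =====
-- def build_is_weekend(time_steps: int, monday_as_day1: bool = True) -> list[bool]:
--     """
--     Return a boolean vector where weekend=True for Saturday/Sunday.
--
--     Assumes timestep 0 corresponds to Monday 00:00.
--     """
--     if time_steps <= 0:
--         raise ValueError("time_steps must be positive.")
--
--     if not monday_as_day1:
--         raise NotImplementedError("Current implementation assumes timestep 0 is Monday 00:00.")
--
--     is_weekend = [False] * time_steps
--     for t in range(time_steps):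
--         day_index = t // 24
--         weekday_idx = day_index % 7  # 0..6 => Mon..Sun
--         is_weekend[t] = weekday_idx >= 5
--     return is_weekend
-- ===== SOURCE B (Python) =====
-- def build_is_weekend(time_steps: int, monday_as_day1: bool = True) -> list[bool]:
--     """Weekend mask built by tiling a fixed 168-hour weekly template."""
--     if time_steps <= 0:
--         raise ValueError("time_steps must be positive.")
--     if not monday_as_day1:
--         raise NotImplementedError("Current implementation assumes timestep 0 is Monday 00:00.")
--     week = [False] * 120 + [True] * 48  # Mon..Fri hours 0..119, Sat/Sun 120..167
--     return (week * (time_steps // 168 + 1))[:time_steps]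
-- ===== Notes on version B (the rewrite author's own statement) =====
-- stated objective: alternative
-- what changed: Replaces the per-hour //24 and %7 arithmetic loop by building one 168-hour weekly template once and tiling it with list repetition plus a slice.
import Mathlib
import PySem

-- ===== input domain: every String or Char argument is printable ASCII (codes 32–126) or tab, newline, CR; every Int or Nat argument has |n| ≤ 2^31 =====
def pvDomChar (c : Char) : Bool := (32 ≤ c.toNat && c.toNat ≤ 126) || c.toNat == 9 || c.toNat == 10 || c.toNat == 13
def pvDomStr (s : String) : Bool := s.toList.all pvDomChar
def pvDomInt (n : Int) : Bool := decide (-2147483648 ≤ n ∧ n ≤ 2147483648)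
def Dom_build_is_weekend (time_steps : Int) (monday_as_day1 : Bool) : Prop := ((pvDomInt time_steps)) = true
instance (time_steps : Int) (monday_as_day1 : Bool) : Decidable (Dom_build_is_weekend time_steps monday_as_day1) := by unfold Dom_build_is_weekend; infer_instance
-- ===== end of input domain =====

set_option maxRecDepth 8000


-- B replaces the per-hour //24 and %7 loop by tiling one fixed 168-hour weekly template; same O(n) cost, different decomposition.
-- ===== PORT A =====
def build_is_weekend (time_steps : Int) (monday_as_day1 : Bool) : List Bool :=
  if time_steps ≤ 0 then []  -- Python raises ValueError; excluded by Pre_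
  else if !monday_as_day1 then []  -- Python raises NotImplementedError; excluded by Pre_
  else
    (PySem.List.pyRange 0 time_steps 1).foldl
      (fun is_weekend t =>
        let day_index := PySem.Int.floordiv t 24
        let weekday_idx := PySem.Int.mod day_index 7
        is_weekend.set t.toNat (decide (5 ≤ weekday_idx)))
      (List.replicate time_steps.toNat false)

-- ===== PORT B =====
def build_is_weekend_alt (time_steps : Int) (monday_as_day1 : Bool) : List Bool :=
  if time_steps ≤ 0 then []  -- Python raises ValueError; excluded by Pre_
  else if !monday_as_day1 then []  -- Python raises NotImplementedError; excluded by Pre_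
  else
    let week := List.replicate 120 false ++ List.replicate 48 true
    PySem.List.slice (PySem.List.pyRepeat week (PySem.Int.floordiv time_steps 168 + 1)) none (some time_steps)

-- ===== PRECONDITION & SPEC =====
-- Pre_ excludes exactly the inputs where Python A raises: ValueError (time_steps <= 0) and NotImplementedError (not monday_as_day1).
def Pre_build_is_weekend (time_steps : Int) (monday_as_day1 : Bool) : Prop :=
  0 < time_steps ∧ monday_as_day1 = true
instance (time_steps : Int) (monday_as_day1 : Bool) : Decidable (Pre_build_is_weekend time_steps monday_as_day1) := by unfold Pre_build_is_weekend; infer_instance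
def pvWitness_build_is_weekend : Int × Bool := (200, true)
def Spec_build_is_weekend (time_steps : Int) (monday_as_day1 : Bool) (out : List Bool) : Prop := out = build_is_weekend_alt time_steps monday_as_day1
instance (time_steps : Int) (monday_as_day1 : Bool) (out : List Bool) : Decidable (Spec_build_is_weekend time_steps monday_as_day1 out) := by unfold Spec_build_is_weekend; infer_instance

-- ===== CLAIM (what is proved, stated in full; the proofs are below) =====
def Claim_equal_build_is_weekend : Prop := ∀ (time_steps : Int) (monday_as_day1 : Bool), Dom_build_is_weekend time_steps monday_as_day1 → Pre_build_is_weekend time_steps monday_as_day1 → Spec_build_is_weekend time_steps monday_as_day1 (build_is_weekend time_steps monday_as_day1)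

-- ===== LEMMAS AND PROOFS =====

-- the per-hour formula, over Nat indices
def pvF (t : Nat) : Bool := decide (5 ≤ t / 24 % 7)

theorem pvF_period (t : Nat) : pvF (t + 168) = pvF t := by
  unfold pvF
  have h : (t + 168) / 24 = t / 24 + 7 := by omega
  rw [h, Nat.add_mod_right]

theorem pvWeek_eq : List.replicate 120 false ++ List.replicate 48 true = (List.range 168).map pvF := by
  decide

-- tiling the weekly template = mapping the formula over an initial range
theorem pvTile (k n : Nat) (h : n ≤ 168 * k) :
    (List.flatten (List.replicate k (List.replicate 120 false ++ List.replicate 48 true))).take n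
      = (List.range n).map pvF := by
  induction k generalizing n with
  | zero =>
    have : n = 0 := by omega
    simp [this]
  | succ k ih =>
    rw [List.replicate_succ, List.flatten_cons, List.take_append]
    have hlen : (List.replicate 120 false ++ List.replicate 48 true).length = 168 := by
      simp only [List.length_append, List.length_replicate]
    by_cases hn : n ≤ 168
    · have h1 : n - (List.replicate 120 false ++ List.replicate 48 true).length = 0 := by omega
      rw [h1, List.take_zero, List.append_nil, pvWeek_eq, ← List.map_take, List.take_range]
      congr 2
      omega
    · have h2 : (List.replicate 120 false ++ List.replicate 48 true).take n
          = List.replicate 120 false ++ List.replicate 48 true := by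
        apply List.take_of_length_le; omega
      rw [h2, hlen, ih (n - 168) (by omega), pvWeek_eq]
      have hr : List.range n = List.range 168 ++ (List.range (n - 168)).map (fun i => i + 168) := by
        have : n = 168 + (n - 168) := by omega
        rw [this, List.range_add]
        simp [Nat.add_comm]
      rw [hr, List.map_append, List.map_map]
      congr 1
      apply List.map_congr_left
      intro i _
      exact (pvF_period i).symm

-- the set-in-place loop over range fills the replicate with the mapped formula
theorem pvFill (n : Nat) (extra : List Bool) :
    (List.range n).foldl (fun acc t => acc.set t (pvF t)) (List.replicate n false ++ extra)
      = (List.range n).map pvF ++ extra := by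
  induction n generalizing extra with
  | zero => simp
  | succ n ih =>
    rw [List.range_succ, List.foldl_append, List.replicate_succ' , List.append_assoc,
      List.singleton_append, ih (false :: extra)]
    simp only [List.foldl_cons, List.foldl_nil]
    rw [List.set_append_right _ _ (by simp)]
    simp

theorem build_is_weekend_eq (n : Int) (hn : 0 < n) :
    build_is_weekend n true = (List.range n.toNat).map pvF := by
  unfold build_is_weekend
  rw [if_neg (by omega), if_neg (by simp)]
  rw [PySem.List.pyRange_one 0 n]
  simp only [zero_add, sub_zero, List.foldl_map]
  rw [PySem.List.foldl_congr_mem (l := List.range n.toNat) (init := List.replicate n.toNat false)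
    (f := fun (acc : List Bool) (k : Nat) =>
      acc.set ((k : Int)).toNat (decide (5 ≤ PySem.Int.mod (PySem.Int.floordiv (k : Int) 24) 7)))
    (g := fun (acc : List Bool) (k : Nat) => acc.set k (pvF k))
    (by
      intro acc k _
      simp only []
      rw [PySem.Int.floordiv_eq_ediv_of_pos (by norm_num),
        PySem.Int.mod_eq_emod_of_pos (by norm_num)]
      unfold pvF
      simp only [Int.toNat_natCast]
      congr 1
      simp only [decide_eq_decide]
      omega)]
  have hfill := pvFill n.toNat []
  simpa using hfill

theorem build_is_weekend_alt_eq (n : Int) (hn : 0 < n) :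
    build_is_weekend_alt n true = (List.range n.toNat).map pvF := by
  unfold build_is_weekend_alt
  rw [if_neg (by omega), if_neg (by simp)]
  rw [PySem.List.slice_to _ (by omega)]
  have hrep : PySem.List.pyRepeat (List.replicate 120 false ++ List.replicate 48 true)
      (PySem.Int.floordiv n 168 + 1)
      = (List.replicate (PySem.Int.floordiv n 168 + 1).toNat
          (List.replicate 120 false ++ List.replicate 48 true)).flatten := by
    unfold PySem.List.pyRepeat; rfl
  rw [hrep]
  apply pvTile
  rw [PySem.Int.floordiv_eq_ediv_of_pos (by norm_num)]
  omega

-- ===== VERDICT (by name: the statement is the Claim_ definition above) =====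
theorem build_is_weekend_spec : Claim_equal_build_is_weekend := by
  intro n m _ hpre
  obtain ⟨hn, hm⟩ := hpre
  subst hm
  unfold Spec_build_is_weekend
  rw [build_is_weekend_eq n hn, build_is_weekend_alt_eq n hn]
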